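-- pv_equiv track=rewrite | github.com/KanishkT123/KineticTypography | allitdetect.py | alliterator
-- ===== SOURCE A (Python) =====
-- def alliterator(pronounceList):
-- 	'''Takes in a list of lists of pronunciations from the CMU dictionary
-- 	And then tries to look for alliteration among the pronunciations.
-- 	Input: List of pronunciations from CMU Dict
-- 	Output: A count of how often each sound appears, and the places where it appears'''
-- 	#Take the first syllable for every pronounciation
-- 	stressed = [x[0][0] for x in pronounceList]
-- 	countDict = {}
-- 	syllDict = {}
-- 	#Populate dictionary with the stressed syllables and their positions
-- 	for j in range(len(stressed)):
-- 		if stressed[j] in countDict: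
-- 			countDict[stressed[j]] += 1
-- 			syllDict[stressed[j]].append(j)
-- 		else:
-- 			countDict[stressed[j]] = 1
-- 			syllDict[stressed[j]] = [j]
-- 	return [countDict, syllDict]
-- ===== SOURCE B (Python) =====
-- def alliterator(pronounceList):
--     stressed = [x[0][0] for x in pronounceList]
--     # distinct first syllables, in first-occurrence order
--     keys = list(dict.fromkeys(stressed))
--     countDict = {k: stressed.count(k) for k in keys}
--     syllDict = {k: [j for j in range(len(stressed)) if stressed[j] == k] for k in keys}
--     return [countDict, syllDict]
-- ===== Notes on version B (the rewrite author's own statement) =====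
-- stated objective: alternative
-- what changed: B first computes the distinct first syllables in first-occurrence order via dict.fromkeys, then builds each dictionary by a separate scan per key (stressed.count(k) and a range comprehension of matching positions), replacing A's single incremental pass that grows two dicts with membership branches; this trades O(n) for O(n*k) nested scans.
import Mathlib
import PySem

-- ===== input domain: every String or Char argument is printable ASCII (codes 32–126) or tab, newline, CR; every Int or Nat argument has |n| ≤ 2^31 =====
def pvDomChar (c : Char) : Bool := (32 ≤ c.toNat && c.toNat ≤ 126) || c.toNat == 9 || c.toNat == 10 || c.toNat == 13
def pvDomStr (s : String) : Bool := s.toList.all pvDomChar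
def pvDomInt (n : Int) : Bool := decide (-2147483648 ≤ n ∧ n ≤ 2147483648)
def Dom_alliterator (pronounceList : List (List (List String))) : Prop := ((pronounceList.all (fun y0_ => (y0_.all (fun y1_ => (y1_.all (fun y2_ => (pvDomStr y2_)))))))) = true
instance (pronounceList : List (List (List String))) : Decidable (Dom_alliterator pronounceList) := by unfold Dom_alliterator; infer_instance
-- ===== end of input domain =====

-- B first lists the distinct first syllables via dict.fromkeys, then derives each
-- dictionary by a separate scan per key (count / range comprehension), instead of A's
-- single incremental pass over positions (objective: alternative, not faster).

-- ===== PORT A =====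
def alliterator (pronounceList : List (List (List String))) : (List (String × Int)) × (List (String × List Int)) :=
  -- stressed = [x[0][0] for x in pronounceList]  (x[0][0] raises on empty x / empty x[0]; excluded by Pre_)
  let stressed : List String :=
    pronounceList.map (fun x => PySem.List.pyGetD (PySem.List.pyGetD x 0 []) 0 "")
  -- for j in range(len(stressed)): …
  let res :=
    (PySem.List.pyRange 0 (stressed.length : Int) 1).foldl
      (fun (st : PySem.Dict String Int × PySem.Dict String (List Int)) j =>
        if st.1.contains (PySem.List.pyGetD stressed j "") then
          (st.1.modify (PySem.List.pyGetD stressed j "") 0 (· + 1),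
           st.2.modify (PySem.List.pyGetD stressed j "") [] (· ++ [j]))
        else
          (st.1.insert (PySem.List.pyGetD stressed j "") 1,
           st.2.insert (PySem.List.pyGetD stressed j "") [j]))
      (PySem.Dict.empty, PySem.Dict.empty)
  (res.1.items, res.2.items)

-- ===== PORT B =====
def alliterator_alt (pronounceList : List (List (List String))) : (List (String × Int)) × (List (String × List Int)) :=
  let stressed : List String :=
    pronounceList.map (fun x => PySem.List.pyGetD (PySem.List.pyGetD x 0 []) 0 "")
  -- keys = list(dict.fromkeys(stressed))
  let keys : List String := PySem.List.dedup stressed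
  -- countDict = {k: stressed.count(k) for k in keys}
  let countDict : List (String × Int) :=
    keys.map (fun k => (k, (PySem.List.count stressed k : Int)))
  -- syllDict = {k: [j for j in range(len(stressed)) if stressed[j] == k] for k in keys}
  let syllDict : List (String × List Int) :=
    keys.map (fun k =>
      (k, (PySem.List.pyRange 0 (stressed.length : Int) 1).filter
            (fun j => PySem.List.pyGetD stressed j "" == k)))
  (countDict, syllDict)

-- ===== PRECONDITION & SPEC =====
-- Pre_ excludes exactly the inputs where Python's x[0][0] raises an IndexError.
def Pre_alliterator (pronounceList : List (List (List String))) : Prop :=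
  ∀ x ∈ pronounceList, x ≠ [] ∧ x.headD [] ≠ []
instance (pronounceList : List (List (List String))) : Decidable (Pre_alliterator pronounceList) := by unfold Pre_alliterator; infer_instance

def pvWitness_alliterator : List (List (List String)) :=
  [[["K", "AE1", "T"]], [["K", "IH1", "NG"], ["K", "AH0", "NG"]], [["D", "AO1", "G"]]]

def Spec_alliterator (pronounceList : List (List (List String))) (out : (List (String × Int)) × (List (String × List Int))) : Prop := out = alliterator_alt pronounceList
instance (pronounceList : List (List (List String))) (out : (List (String × Int)) × (List (String × List Int))) : Decidable (Spec_alliterator pronounceList out) := by unfold Spec_alliterator; infer_instance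

-- ===== CLAIM (what is proved, stated in full; the proofs are below) =====
def Claim_equal_alliterator : Prop := ∀ (pronounceList : List (List (List String))), Dom_alliterator pronounceList → Pre_alliterator pronounceList → Spec_alliterator pronounceList (alliterator pronounceList)

-- ===== LEMMAS AND PROOFS =====

-- A's index loop over range(len(xs)) is the loop over enumerate(xs)
theorem pv_foldl_range_eq_enumerate {σ : Type} (g : σ → Int → String → σ) :
    ∀ (xs pre : List String) (init : σ),
      (PySem.List.pyRange (pre.length : Int) (((pre ++ xs).length : Int)) 1).foldl
        (fun st j => g st j (PySem.List.pyGetD (pre ++ xs) j "")) init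
      = (PySem.List.enumerate xs (pre.length : Int)).foldl (fun st p => g st p.1 p.2) init := by
  intro xs
  induction xs with
  | nil =>
    intro pre init
    simp [PySem.List.enumerate, PySem.List.pyRange_one_eq_nil]
  | cons x t ih =>
    intro pre init
    have h1 : (pre.length : Int) < ((pre ++ x :: t).length : Int) := by simp
    rw [PySem.List.pyRange_one_cons h1]
    simp only [List.foldl_cons, PySem.List.enumerate]
    have h0 : (0 : Int) ≤ (pre.length : Int) := by positivity
    have hget : PySem.List.pyGetD (pre ++ x :: t) (pre.length : Int) "" = x := by
      rw [PySem.List.pyGetD_eq_getElem (pre ++ x :: t) "" h0 h1]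
      simp
    rw [hget]
    have := ih (pre ++ [x]) (g init (pre.length : Int) x)
    simpa using this

-- the canonical value of A's pair of dictionaries after processing a list of (index, syllable) pairs
def pvKeys (l : List (Int × String)) : List String := PySem.List.dedup (l.map Prod.snd)
def pvCountD (l : List (Int × String)) : PySem.Dict String Int :=
  { items := (pvKeys l).map (fun k => (k, (l.countP (fun p => p.2 == k) : Int))) }
def pvSyllD (l : List (Int × String)) : PySem.Dict String (List Int) :=
  { items := (pvKeys l).map (fun k => (k, (l.filter (fun p => p.2 == k)).map Prod.fst)) }

theorem pv_contains_map {ν : Type} (keys : List String) (f : String → ν) (s : String) :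
    (PySem.Dict.mk (keys.map (fun k => (k, f k)))).contains s = decide (s ∈ keys) := by
  simp only [PySem.Dict.contains, List.any_map, Function.comp_def]
  rw [List.any_beq']
  simp

theorem pv_keys_mem (l : List (Int × String)) (s : String) :
    s ∈ pvKeys l ↔ s ∈ l.map Prod.snd := by
  simp [pvKeys, PySem.List.dedup, PySem.Set.mem_ofList]

theorem pv_find_map {ν : Type} (keys : List String) (f : String → ν) (k : String)
    (hk : k ∈ keys) :
    List.find? (fun p => p.1 == k) (keys.map (fun x => (x, f x))) = some (k, f k) := by
  rw [List.find?_map]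
  have hcomp : ((fun p : String × ν => p.1 == k) ∘ fun x => (x, f x)) = fun x => x == k := rfl
  rw [hcomp]
  cases h : keys.find? (fun x => x == k) with
  | none =>
    exact absurd hk (fun hm => by simpa using List.find?_eq_none.mp h k hm)
  | some x =>
    have hx : x = k := by simpa using List.find?_some h
    subst hx; simp

theorem pv_getD_map {ν : Type} (keys : List String) (f : String → ν) (k : String)
    (hk : k ∈ keys) (dflt : ν) :
    (PySem.Dict.mk (keys.map (fun x => (x, f x)))).getD k dflt = f k := by
  simp [PySem.Dict.getD, PySem.Dict.get?, pv_find_map keys f k hk]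

-- the loop invariant: A's incremental pass computes the canonical dictionaries
theorem pv_loop_inv (l : List (Int × String)) :
    (l.foldl (fun (st : PySem.Dict String Int × PySem.Dict String (List Int)) p =>
        if st.1.contains p.2 then
          (st.1.modify p.2 0 (· + 1), st.2.modify p.2 [] (· ++ [p.1]))
        else
          (st.1.insert p.2 1, st.2.insert p.2 [p.1])) (PySem.Dict.empty, PySem.Dict.empty))
    = (pvCountD l, pvSyllD l) := by
  induction l using List.reverseRecOn with
  | nil => simp [pvCountD, pvSyllD, pvKeys, PySem.List.dedup, PySem.Set.ofList, PySem.Dict.empty]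
  | append_singleton t p ih =>
    obtain ⟨j, s⟩ := p
    rw [List.foldl_append, ih]
    simp only [List.foldl_cons, List.foldl_nil]
    have hkeys : pvKeys (t ++ [(j, s)]) =
        if s ∈ pvKeys t then pvKeys t else pvKeys t ++ [s] := by
      simp only [pvKeys, List.map_append, List.map_cons, List.map_nil]
      rw [PySem.List.dedup, PySem.Set.ofList_eq_foldl, List.foldl_append,
          ← PySem.Set.ofList_eq_foldl]
      simp only [List.foldl_cons, List.foldl_nil, PySem.Set.add, PySem.Set.contains]
      rw [PySem.List.dedup]
      by_cases hmem : s ∈ PySem.Set.ofList (t.map Prod.snd)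
      · rw [if_pos (by simpa using hmem), if_pos hmem]
      · rw [if_neg (by simpa using hmem), if_neg hmem]
    by_cases hmem : s ∈ pvKeys t
    · have hmem' : s ∈ t.map Prod.snd := (pv_keys_mem t s).mp hmem
      have hcont1 : (pvCountD t).contains s = true := by
        rw [pvCountD, pv_contains_map]
        exact decide_eq_true hmem
      have hcont2 : (pvSyllD t).contains s = true := by
        rw [pvSyllD, pv_contains_map]
        exact decide_eq_true hmem
      have hget1 : (pvCountD t).getD s 0 = (t.countP (fun p => p.2 == s) : Int) := by
        unfold pvCountD
        exact pv_getD_map _ _ s hmem 0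
      have hget2 : (pvSyllD t).getD s [] = (t.filter (fun p => p.2 == s)).map Prod.fst := by
        unfold pvSyllD
        exact pv_getD_map _ _ s hmem []
      simp only [hcont1, if_true]
      refine Prod.ext ?_ ?_
      · simp only [PySem.Dict.modify, PySem.Dict.insert, hcont1, if_true, hget1]
        simp only [pvCountD, hkeys, hmem, if_true, List.map_map]
        congr 1
        apply List.map_congr_left
        intro k hk
        by_cases hks : k = s
        · subst hks
          simp [List.countP_append]
        · have hne : ¬ (k == s) = true := by simp [hks]
          have hne' : ¬ (s = k) := fun h => hks h.symm
          simp [List.countP_append, hks, hne']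
      · simp only [PySem.Dict.modify, PySem.Dict.insert, hcont2, if_true, hget2]
        simp only [pvSyllD, hkeys, hmem, if_true, List.map_map]
        congr 1
        apply List.map_congr_left
        intro k hk
        by_cases hks : k = s
        · subst hks
          simp [List.filter_append]
        · have hne : ¬ (k == s) = true := by simp [hks]
          have hne' : ¬ (s = k) := fun h => hks h.symm
          simp [List.filter_append, hks, hne']
    · have hmem' : s ∉ t.map Prod.snd := fun h => hmem ((pv_keys_mem t s).mpr h)
      have hcont1 : (pvCountD t).contains s = false := by
        rw [pvCountD, pv_contains_map]
        exact decide_eq_false hmem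
      have hcont2 : (pvSyllD t).contains s = false := by
        rw [pvSyllD, pv_contains_map]
        exact decide_eq_false hmem
      have hcnt0 : t.countP (fun p => p.2 == s) = 0 := by
        rw [List.countP_eq_zero]
        intro p hp
        simp only [beq_iff_eq]
        intro he
        exact hmem' (he ▸ List.mem_map_of_mem (f := Prod.snd) hp)
      have hfil0 : t.filter (fun p => p.2 == s) = [] := by
        rw [List.filter_eq_nil_iff]
        intro p hp
        simp only [beq_iff_eq]
        intro he
        exact hmem' (he ▸ List.mem_map_of_mem (f := Prod.snd) hp)
      simp only [hcont1, Bool.false_eq_true, if_false]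
      refine Prod.ext ?_ ?_
      · simp only [PySem.Dict.insert, hcont1, Bool.false_eq_true, if_false]
        simp only [pvCountD, hkeys, hmem, if_false, List.map_append, List.map_cons, List.map_nil]
        congr 1
        congr 1
        · apply List.map_congr_left
          intro k hk
          have hks : ¬ (s = k) := fun he => hmem (he ▸ hk)
          simp [List.countP_append, hks]
        · simp [List.countP_append, hcnt0]
      · simp only [PySem.Dict.insert, hcont2, Bool.false_eq_true, if_false]
        simp only [pvSyllD, hkeys, hmem, if_false, List.map_append, List.map_cons, List.map_nil]
        congr 1
        congr 1
        · apply List.map_congr_left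
          intro k hk
          have hks : ¬ (s = k) := fun he => hmem (he ▸ hk)
          simp [List.filter_append, hks]
        · simp [List.filter_append, hfil0]

-- B's per-key scans read off the canonical dictionaries (over enumerate stressed)
theorem pv_enum_map_snd (xs : List String) (n : Int) :
    (PySem.List.enumerate xs n).map Prod.snd = xs := by
  induction xs generalizing n with
  | nil => simp [PySem.List.enumerate]
  | cons x t ih => simp [PySem.List.enumerate, ih]

-- ===== VERDICT (by name: the statement is the Claim_ definition above) =====
theorem alliterator_spec : Claim_equal_alliterator := by
  intro pl _ _
  simp only [Spec_alliterator, alliterator, alliterator_alt]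
  set stressed := pl.map (fun x => PySem.List.pyGetD (PySem.List.pyGetD x 0 []) 0 "") with hst
  have hrange := pv_foldl_range_eq_enumerate
    (fun (st : PySem.Dict String Int × PySem.Dict String (List Int)) j s =>
      if st.1.contains s then
        (st.1.modify s 0 (· + 1), st.2.modify s [] (· ++ [j]))
      else
        (st.1.insert s 1, st.2.insert s [j]))
    stressed [] (PySem.Dict.empty, PySem.Dict.empty)
  simp only [List.nil_append, List.length_nil, Nat.cast_zero] at hrange
  rw [hrange, pv_loop_inv]
  set l := PySem.List.enumerate stressed 0 with hl
  have hsnd : l.map Prod.snd = stressed := pv_enum_map_snd stressed 0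
  refine Prod.ext ?_ ?_
  · -- counts: countP over enumerate = count over stressed
    simp only [pvCountD, pvKeys, hsnd]
    apply List.map_congr_left
    intro k hk
    have : l.countP (fun p => p.2 == k) = stressed.count k := by
      rw [← hsnd, List.count_eq_countP, List.countP_map]
      rfl
    rw [this]; rfl
  · -- positions: filter over enumerate, projected to indices, = range comprehension
    simp only [pvSyllD, pvKeys, hsnd]
    apply List.map_congr_left
    intro k hk
    have hfold := pv_foldl_range_eq_enumerate
      (fun (acc : List Int) j s => if s == k then acc ++ [j] else acc)
      stressed [] ([] : List Int)
    simp only [List.nil_append, List.length_nil, Nat.cast_zero] at hfold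
    have e1 := PySem.List.foldl_append_if_eq_filter
      (fun j => PySem.List.pyGetD stressed j "" == k)
      (PySem.List.pyRange 0 (stressed.length : Int) 1) []
    have e2 := PySem.List.foldl_append_if
      (fun p : Int × String => p.2 == k) Prod.fst (PySem.List.enumerate stressed 0) []
    exact congrArg (Prod.mk k) ((e2.symm.trans hfold.symm).trans e1)
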